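-- pv_equiv track=rewrite | github.com/zhadyz/test | backend/migration/rule_renderer.py | _strip_bash_header
-- ===== SOURCE A (Python) =====
-- def _strip_bash_header(script: str) -> str:
--     """
--     Strip shebang and header comments from bash script.
--
--     Args:
--         script: Bash script with header
--
--     Returns:
--         Script body without header
--     """
--     lines = script.split('\n')
--     body_lines = []
--
--     in_header = True
--     for line in lines:
--         if in_header and (line.startswith('#!') or line.startswith('#')):
--             continue
--         else:
--             in_header = False
--             body_lines.append(line)
--
--     # Remove leading blank lines
--     while body_lines and not body_lines[0].strip():
--         body_lines.pop(0)
--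
--     return '\n'.join(body_lines)
-- ===== SOURCE B (Python) =====
-- def _drop_while(pred, lines):
--     while lines and pred(lines[0]):
--         lines = lines[1:]
--     return lines
--
--
-- def _strip_bash_header(script: str) -> str:
--     rest = _drop_while(lambda l: l.startswith('#'), script.split('\n'))
--     rest = _drop_while(lambda l: not l.strip(), rest)
--     return '\n'.join(rest)
-- ===== Notes on version B (the rewrite author's own statement) =====
-- stated objective: idiomatic
-- what changed: Replaces the flag-and-accumulate loop plus a pop-while cleanup with two successive prefix-drop (drop-while) passes over the split lines: drop the leading comment lines, then the leading blank lines, then join.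
import Mathlib
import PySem

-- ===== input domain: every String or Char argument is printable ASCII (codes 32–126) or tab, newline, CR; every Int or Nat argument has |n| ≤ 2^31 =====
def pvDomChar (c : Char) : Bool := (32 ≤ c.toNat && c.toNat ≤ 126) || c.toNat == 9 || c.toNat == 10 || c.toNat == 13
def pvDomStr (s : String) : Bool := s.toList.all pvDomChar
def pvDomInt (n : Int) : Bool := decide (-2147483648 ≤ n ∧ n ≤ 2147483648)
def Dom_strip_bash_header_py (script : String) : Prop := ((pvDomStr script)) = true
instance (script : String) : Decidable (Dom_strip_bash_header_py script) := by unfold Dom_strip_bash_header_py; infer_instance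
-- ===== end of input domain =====

-- B replaces A's flag-and-accumulate loop plus pop-while cleanup with two prefix-drop passes (idiomatic decomposition, same cost).

-- ===== PORT A =====
-- the body of A's 'for line in lines' loop, state = (in_header, body_lines)
def stripA_step (st : Bool × List String) (line : String) : Bool × List String :=
  if st.1 && (PySem.Str.startswith line "#!" || PySem.Str.startswith line "#") then st
  else (false, st.2 ++ [line])

-- A's 'while body_lines and not body_lines[0].strip(): body_lines.pop(0)'
def stripA_popBlank : List String → List String
  | [] => []
  | l :: ls => if PySem.Str.strip l == "" then stripA_popBlank ls else l :: ls

def strip_bash_header_py (script : String) : String :=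
  -- lines = script.split('\n')  (sep "\n" nonempty, so split? is always some);
  -- the for-loop is the foldl, then the pop-while, then the join
  PySem.Str.join "\n"
    (stripA_popBlank
      (List.foldl stripA_step (true, []) ((PySem.Str.split? script "\n").getD [])).2)

-- ===== PORT B =====
-- Source B's _drop_while helper
def pvDropWhile (p : String → Bool) : List String → List String
  | [] => []
  | l :: ls => if p l then pvDropWhile p ls else l :: ls

def strip_bash_header_py_alt (script : String) : String :=
  PySem.Str.join "\n"
    (pvDropWhile (fun l => PySem.Str.strip l == "")
      (pvDropWhile (fun l => PySem.Str.startswith l "#")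
        ((PySem.Str.split? script "\n").getD [])))

-- ===== PRECONDITION & SPEC =====
def Spec_strip_bash_header_py (script : String) (out : String) : Prop := out = strip_bash_header_py_alt script
instance (script : String) (out : String) : Decidable (Spec_strip_bash_header_py script out) := by unfold Spec_strip_bash_header_py; infer_instance

-- ===== CLAIM (what is proved, stated in full; the proofs are below) =====
def Claim_equal_strip_bash_header_py : Prop := ∀ (script : String), Dom_strip_bash_header_py script → Spec_strip_bash_header_py script (strip_bash_header_py script)

-- ===== LEMMAS AND PROOFS =====

-- a line starting with "#!" also starts with "#", so A's double test equals B's single one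
lemma hash_of_bang (l : String) (h : PySem.Str.startswith l "#!" = true) :
    PySem.Str.startswith l "#" = true := by
  have hp := (PySem.Chars.startswith_iff l.toList ("#!".toList)).mp (by simpa using h)
  simp only [PySem.Str.startswith_eq]
  exact (PySem.Chars.startswith_iff _ _).mpr (List.IsPrefix.trans (by decide) hp)

-- a line starting with "#!" also starts with "#", so A's double test equals B's single one
lemma start_hash (l : String) :
    (PySem.Str.startswith l "#!" || PySem.Str.startswith l "#") = PySem.Str.startswith l "#" := by
  cases hb : PySem.Str.startswith l "#!" with
  | false => rw [Bool.false_or]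
  | true => rw [Bool.true_or, hash_of_bang l hb]

-- once in_header is False, A's loop appends every remaining line
lemma stripA_foldl_false (lines : List String) (acc : List String) :
    lines.foldl stripA_step (false, acc) = (false, acc ++ lines) := by
  induction lines generalizing acc with
  | nil => simp
  | cons l ls ih => simp [List.foldl, stripA_step, ih]

-- A's header loop computes a prefix-drop of the comment lines
lemma stripA_foldl_true (lines : List String) :
    (List.foldl stripA_step (true, []) lines).2
      = pvDropWhile (fun l => PySem.Str.startswith l "#") lines := by
  induction lines with
  | nil => rfl
  | cons l ls ih =>
    rw [List.foldl_cons]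
    by_cases h : PySem.Str.startswith l "#" = true
    · have hC : PySem.Chars.startswith l.toList (['#']) = true := by simpa using h
      have h2 : stripA_step (true, []) l = (true, []) := by
        simp only [stripA_step, Bool.true_and, start_hash l]
        simp [hC]
      rw [h2, ih]
      simp [pvDropWhile, hC]
    · have hC : PySem.Chars.startswith l.toList (['#']) = false := by
        simpa using Bool.eq_false_iff.mpr h
      have h2 : stripA_step (true, []) l = (false, [l]) := by
        simp only [stripA_step, Bool.true_and, start_hash l]
        simp [hC]
      rw [h2, stripA_foldl_false]
      simp [pvDropWhile, hC]

-- A's pop-while loop is B's second prefix-drop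
lemma popBlank_eq (ls : List String) :
    stripA_popBlank ls = pvDropWhile (fun l => PySem.Str.strip l == "") ls := by
  induction ls with
  | nil => rfl
  | cons l ls ih =>
    simp only [stripA_popBlank, pvDropWhile]
    split_ifs with h <;> simp [h, ih]

-- ===== VERDICT (by name: the statement is the Claim_ definition above) =====
theorem strip_bash_header_py_spec : Claim_equal_strip_bash_header_py := by
  intro script _
  unfold Spec_strip_bash_header_py strip_bash_header_py strip_bash_header_py_alt
  rw [stripA_foldl_true, popBlank_eq]
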